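-- pv_equiv track=rewrite | github.com/gowthamfelz1995/Test-code | controller.py | get_field_index
-- ===== SOURCE A (Python) =====
-- def get_field_index(field_name, data,list_name,obj_name):
--         obj_list = list()
--         for record in data[list_name]:
--             obj_list.append(record[obj_name])
--         if len(obj_list) > 0:
--             try:
--                 return obj_list.index(field_name)
--             except ValueError:
--                 return -1
--         else:
--             return -1
-- ===== SOURCE B (Python) =====
-- def get_field_index(field_name, data, list_name, obj_name):
--     for i, record in enumerate(data[list_name]):
--         if record[obj_name] == field_name:
--             return i
--     return -1
-- ===== Notes on version B (the rewrite author's own statement) =====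
-- stated objective: simpler
-- what changed: Replaces A's build-a-full-list-of-field-values-then-.index (two passes plus a redundant non-empty guard and try/except) with a single enumerate loop that returns the index of the first matching record immediately.
import Mathlib
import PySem

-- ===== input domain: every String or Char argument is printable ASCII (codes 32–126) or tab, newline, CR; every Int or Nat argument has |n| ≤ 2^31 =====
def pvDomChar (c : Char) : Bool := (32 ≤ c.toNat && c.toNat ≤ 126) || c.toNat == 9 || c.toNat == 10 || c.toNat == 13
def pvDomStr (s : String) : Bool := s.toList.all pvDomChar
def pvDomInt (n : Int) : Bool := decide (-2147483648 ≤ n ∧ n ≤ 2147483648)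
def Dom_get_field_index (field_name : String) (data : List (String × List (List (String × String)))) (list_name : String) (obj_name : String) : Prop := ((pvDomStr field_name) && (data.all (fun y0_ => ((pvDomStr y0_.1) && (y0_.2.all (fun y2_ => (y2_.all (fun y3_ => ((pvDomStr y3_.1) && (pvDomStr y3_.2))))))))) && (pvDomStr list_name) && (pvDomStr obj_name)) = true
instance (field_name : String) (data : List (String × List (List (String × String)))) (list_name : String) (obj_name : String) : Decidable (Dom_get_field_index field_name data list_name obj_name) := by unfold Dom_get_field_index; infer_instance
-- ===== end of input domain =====

-- B replaces A's build-list-then-.index (plus redundant non-empty guard) with one enumerate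
-- loop returning at the first match: simpler, same O(n) cost. Return-value equivalence only.

-- ===== PORT A =====
-- obj_list built by appending record[obj_name] for each record of data[list_name];
-- then `.index` (first occurrence, -1 on ValueError), guarded by len > 0.
def get_field_index (field_name : String) (data : List (String × List (List (String × String)))) (list_name : String) (obj_name : String) : Int :=
  let records := ((PySem.Dict.mk data).get? list_name).getD []
  let obj_list := records.foldl (fun acc r => acc ++ [((PySem.Dict.mk r).get? obj_name).getD ""]) []
  if obj_list.length > 0 then
    match PySem.List.index? obj_list field_name with
    | some i => (i : Int)
    | none => -1
  else -1

-- ===== PORT B =====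
-- single pass with a running index: return i at the first record whose obj_name value matches
def gfiScan (field_name obj_name : String) : List (List (String × String)) → Int → Int
  | [], _ => -1
  | r :: rest, i =>
      if ((PySem.Dict.mk r).get? obj_name).getD "" = field_name then i
      else gfiScan field_name obj_name rest (i + 1)

def get_field_index_alt (field_name : String) (data : List (String × List (List (String × String)))) (list_name : String) (obj_name : String) : Int :=
  gfiScan field_name obj_name (((PySem.Dict.mk data).get? list_name).getD []) 0

-- ===== PRECONDITION & SPEC =====
-- Pre_ excludes exactly the inputs on which the Python A raises KeyError: list_name missing
-- from data, or obj_name missing from some record of data[list_name].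
def Pre_get_field_index (field_name : String) (data : List (String × List (List (String × String)))) (list_name : String) (obj_name : String) : Prop :=
  ((PySem.Dict.mk data).contains list_name
    && (((PySem.Dict.mk data).get? list_name).getD []).all
         (fun r => (PySem.Dict.mk r).contains obj_name)) = true
instance (field_name : String) (data : List (String × List (List (String × String)))) (list_name : String) (obj_name : String) : Decidable (Pre_get_field_index field_name data list_name obj_name) := by unfold Pre_get_field_index; infer_instance

def pvWitness_get_field_index : String × (List (String × List (List (String × String)))) × String × String :=
  ("x", [("lst", [[("f", "y")], [("f", "x")]])], "lst", "f")

def Spec_get_field_index (field_name : String) (data : List (String × List (List (String × String)))) (list_name : String) (obj_name : String) (out : Int) : Prop := out = get_field_index_alt field_name data list_name obj_name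
instance (field_name : String) (data : List (String × List (List (String × String)))) (list_name : String) (obj_name : String) (out : Int) : Decidable (Spec_get_field_index field_name data list_name obj_name out) := by unfold Spec_get_field_index; infer_instance

-- ===== CLAIM (what is proved, stated in full; the proofs are below) =====
def Claim_equal_get_field_index : Prop := ∀ (field_name : String) (data : List (String × List (List (String × String)))) (list_name : String) (obj_name : String), Dom_get_field_index field_name data list_name obj_name → Pre_get_field_index field_name data list_name obj_name → Spec_get_field_index field_name data list_name obj_name (get_field_index field_name data list_name obj_name)

-- ===== LEMMAS AND PROOFS =====

-- A's append-fold builds exactly the map of the field extractor over the records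
theorem gfi_foldl_append {α β : Type} (f : α → β) (rs : List α) (acc : List β) :
    rs.foldl (fun acc r => acc ++ [f r]) acc = acc ++ rs.map f := by
  induction rs generalizing acc with
  | nil => simp
  | cons r rest ih => simp [List.foldl, ih]

-- B's scan computes i + (first index of field_name in the mapped list), or -1 if absent
theorem gfiScan_eq (field_name obj_name : String) (rs : List (List (String × String))) (i : Int) :
    gfiScan field_name obj_name rs i =
      match PySem.List.index? (rs.map (fun r => ((PySem.Dict.mk r).get? obj_name).getD "")) field_name with
      | some k => i + (k : Int)
      | none => -1 := by
  induction rs generalizing i with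
  | nil => simp [gfiScan, PySem.List.index?]
  | cons r rest ih =>
      by_cases h : ((PySem.Dict.mk r).get? obj_name).getD "" = field_name
      · rw [List.map_cons, h, PySem.List.index?_cons_self]
        simp [gfiScan, h]
      · rw [List.map_cons, PySem.List.index?_cons_of_ne _ h]
        simp only [gfiScan, if_neg h, ih]
        cases PySem.List.index? (rest.map (fun r => ((PySem.Dict.mk r).get? obj_name).getD "")) field_name with
        | none => simp
        | some k => simp; ring

-- ===== VERDICT (by name: the statement is the Claim_ definition above) =====
theorem get_field_index_spec : Claim_equal_get_field_index := by
  intro field_name data list_name obj_name _ _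
  unfold Spec_get_field_index get_field_index get_field_index_alt
  simp only [gfi_foldl_append, gfiScan_eq, List.nil_append]
  cases hx : PySem.List.index? (( ((PySem.Dict.mk data).get? list_name).getD []).map
      (fun r => ((PySem.Dict.mk r).get? obj_name).getD "")) field_name with
  | none => split_ifs <;> simp
  | some k =>
      have hne : (((PySem.Dict.mk data).get? list_name).getD []).map
          (fun r => ((PySem.Dict.mk r).get? obj_name).getD "") ≠ [] := by
        intro h; rw [h] at hx; simp [PySem.List.index?] at hx
      have hpos : 0 < ((((PySem.Dict.mk data).get? list_name).getD []).map
          (fun r => ((PySem.Dict.mk r).get? obj_name).getD "")).length := List.length_pos_iff.mpr hne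
      rw [if_pos hpos]
      show (k : Int) = 0 + (k : Int)
      omega
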